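-- pv_equiv track=rewrite | github.com/TrungpdtE/0148_Digital_Image_Processing | 522H0148_PhamDangThanhTrung_Lab01/ex3_page19.py | fill_middle
-- ===== SOURCE A (Python) =====
-- def fill_middle(matrix):
--     M=len(matrix)
--     N=len(matrix[0])
--
--     mid_row_start=(M-1)//2
--     mid_row_end=M//2
--     mid_col_start=(N-1)//2
--     mid_col_end=N//2
--
--     for r in range(mid_row_start,mid_row_end+1):
--         for c in range(N):
--             matrix[r][c]=255
--
--     for c in range(mid_col_start,mid_col_end+1):
--         for r in range(M):
--             matrix[r][c] = 255
--
--     return matrix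
-- ===== SOURCE B (Python) =====
-- def fill_middle(matrix):
--     M = len(matrix)
--     N = len(matrix[0])
--     mid_rows = {(M - 1) // 2, M // 2}
--     mid_cols = {(N - 1) // 2, N // 2}
--     for r in range(M):
--         for c in range(N):
--             if r in mid_rows or c in mid_cols:
--                 matrix[r][c] = 255
--     return matrix
-- ===== Notes on version B (the rewrite author's own statement) =====
-- stated objective: alternative
-- what changed: Replaces A's two targeted band-writes (a full-row pass over the middle rows plus a full-column pass over the middle columns) by one predicate-driven sweep over the whole grid that precomputes the middle-row and middle-column index sets and writes 255 wherever the predicate holds.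
import Mathlib
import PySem

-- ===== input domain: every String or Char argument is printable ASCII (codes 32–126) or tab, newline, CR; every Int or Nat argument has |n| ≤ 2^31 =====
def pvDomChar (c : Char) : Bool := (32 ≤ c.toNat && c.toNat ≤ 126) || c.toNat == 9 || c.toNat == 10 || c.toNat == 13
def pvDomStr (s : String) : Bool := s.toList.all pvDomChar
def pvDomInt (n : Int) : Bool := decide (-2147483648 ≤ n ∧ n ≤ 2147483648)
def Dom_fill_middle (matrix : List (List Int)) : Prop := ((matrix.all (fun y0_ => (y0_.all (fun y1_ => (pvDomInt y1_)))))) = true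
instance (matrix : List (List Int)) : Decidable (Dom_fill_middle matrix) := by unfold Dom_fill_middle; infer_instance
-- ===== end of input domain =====

-- B replaces A's two targeted band-writes by one predicate-driven sweep over the whole grid
-- (alternative decomposition, same results). Both Pythons mutate `matrix` in place in the same
-- way; the equivalence proved here is about the returned value.

-- `matrix[r][c] = 255`: replace row r by that row with index c set to 255
-- (PySem.pySetD/pyGetD are exact where Python does not raise; Pre_ excludes the raising inputs).
def pvSet (m : List (List Int)) (r c : Int) : List (List Int) :=
  PySem.List.pySetD m r (PySem.List.pySetD (PySem.List.pyGetD m r []) c (255 : Int))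

-- ===== PORT A =====
def fill_middle (matrix : List (List Int)) : List (List Int) :=
  let M : Int := matrix.length
  let N : Int := (matrix.headD []).length   -- matrix[0]; Pre_ excludes the empty matrix (IndexError)
  let mid_row_start : Int := PySem.Int.floordiv (M - 1) 2
  let mid_row_end : Int := PySem.Int.floordiv M 2
  let mid_col_start : Int := PySem.Int.floordiv (N - 1) 2
  let mid_col_end : Int := PySem.Int.floordiv N 2
  let m1 := (PySem.List.pyRange mid_row_start (mid_row_end + 1) 1).foldl
    (fun acc r => (PySem.List.pyRange 0 N 1).foldl (fun acc2 c => pvSet acc2 r c) acc) matrix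
  (PySem.List.pyRange mid_col_start (mid_col_end + 1) 1).foldl
    (fun acc c => (PySem.List.pyRange 0 M 1).foldl (fun acc2 r => pvSet acc2 r c) acc) m1

-- ===== PORT B =====
def fill_middle_alt (matrix : List (List Int)) : List (List Int) :=
  let M : Int := matrix.length
  let N : Int := (matrix.headD []).length   -- matrix[0]; Pre_ excludes the empty matrix (IndexError)
  let mid_rows : PySem.Set Int :=
    PySem.Set.ofList [PySem.Int.floordiv (M - 1) 2, PySem.Int.floordiv M 2]
  let mid_cols : PySem.Set Int :=
    PySem.Set.ofList [PySem.Int.floordiv (N - 1) 2, PySem.Int.floordiv N 2]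
  (PySem.List.pyRange 0 M 1).foldl
    (fun acc r => (PySem.List.pyRange 0 N 1).foldl
      (fun acc2 c =>
        if mid_rows.contains r || mid_cols.contains c then pvSet acc2 r c else acc2) acc) matrix

-- ===== PRECONDITION & SPEC =====
-- Exactly the inputs on which the Python A returns: a nonempty matrix whose first row is
-- nonempty (N ≥ 1), whose two middle rows have at least N entries, and all of whose rows
-- have more than N//2 entries; on every other input A raises IndexError.
def Pre_fill_middle (matrix : List (List Int)) : Prop :=
  matrix ≠ [] ∧
  1 ≤ (matrix.headD []).length ∧
  (∀ r ∈ [(matrix.length - 1) / 2, matrix.length / 2],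
      (matrix.headD []).length ≤ (matrix.getD r []).length) ∧
  (∀ row ∈ matrix, (matrix.headD []).length / 2 + 1 ≤ row.length)
instance (matrix : List (List Int)) : Decidable (Pre_fill_middle matrix) := by
  unfold Pre_fill_middle; infer_instance

def pvWitness_fill_middle : List (List Int) := [[1, 2, 3], [4, 5, 6], [7, 8, 9]]

def Spec_fill_middle (matrix : List (List Int)) (out : List (List Int)) : Prop := out = fill_middle_alt matrix
instance (matrix : List (List Int)) (out : List (List Int)) : Decidable (Spec_fill_middle matrix out) := by unfold Spec_fill_middle; infer_instance

-- ===== CLAIM (what is proved, stated in full; the proofs are below) =====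
def Claim_equal_fill_middle : Prop := ∀ (matrix : List (List Int)), Dom_fill_middle matrix → Pre_fill_middle matrix → Spec_fill_middle matrix (fill_middle matrix)


-- ===== LEMMAS AND PROOFS =====

-- a sequence of single-cell writes, as one fold over the list of (row, col) targets
def pvWrites (m : List (List Int)) (ps : List (Int × Int)) : List (List Int) :=
  ps.foldl (fun acc p => pvSet acc p.1 p.2) m

-- row i of a matrix, [] when out of range
def pvRowAt (m : List (List Int)) (i : Nat) : List Int := m[i]?.getD []

theorem pvSet_nonneg (m : List (List Int)) (r c : Int) (hr : 0 ≤ r) (hc : 0 ≤ c) :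
    pvSet m r c = m.set r.toNat ((m.getD r.toNat []).set c.toNat 255) := by
  rw [pvSet, PySem.List.pySetD_of_nonneg _ _ hr, PySem.List.pySetD_of_nonneg _ _ hc,
    PySem.List.pyGetD_of_nonneg _ _ hr]

theorem pvSet_length (m : List (List Int)) (r c : Int) :
    (pvSet m r c).length = m.length := by
  simp [pvSet, PySem.List.length_pySetD]

theorem pvRowAt_set (m : List (List Int)) (n i : Nat) (row : List Int) :
    pvRowAt (m.set n row) i = if n = i ∧ i < m.length then row else pvRowAt m i := by
  unfold pvRowAt
  rw [List.getElem?_set]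
  by_cases h1 : n = i
  · by_cases h2 : i < m.length
    · simp [h1, h2]
    · subst h1
      simp [h2]
  · simp [h1]

theorem pvRowAt_pvSet (m : List (List Int)) (r c : Int) (hr : 0 ≤ r) (hc : 0 ≤ c) (i : Nat) :
    pvRowAt (pvSet m r c) i =
      if r.toNat = i ∧ i < m.length then (pvRowAt m i).set c.toNat 255 else pvRowAt m i := by
  rw [pvSet_nonneg _ _ _ hr hc, pvRowAt_set]
  split_ifs with h
  · rw [h.1]
    simp [pvRowAt, List.getD_eq_getElem?_getD]
  · rfl

theorem pvRowAt_pvSet_length (m : List (List Int)) (r c : Int) (hr : 0 ≤ r) (hc : 0 ≤ c)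
    (i : Nat) : (pvRowAt (pvSet m r c) i).length = (pvRowAt m i).length := by
  rw [pvRowAt_pvSet _ _ _ hr hc]
  split_ifs <;> simp

theorem pvRowAt_eq_nil (m : List (List Int)) (i : Nat) (h : m.length ≤ i) :
    pvRowAt m i = [] := by
  unfold pvRowAt
  rw [List.getElem?_eq_none h]
  rfl

theorem pvSet_elem (m : List (List Int)) (r c : Int) (hr : 0 ≤ r) (hc : 0 ≤ c) (i j : Nat) :
    (pvRowAt (pvSet m r c) i)[j]? =
      if (r = (i : Int) ∧ c = (j : Int)) ∧ j < (pvRowAt m i).length then some 255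
      else (pvRowAt m i)[j]? := by
  rw [pvRowAt_pvSet _ _ _ hr hc]
  by_cases h1 : r.toNat = i ∧ i < m.length
  · rw [if_pos h1, List.getElem?_set]
    by_cases h3 : c.toNat = j
    · by_cases h4 : j < (pvRowAt m i).length
      · rw [if_pos h3, if_pos (by omega : c.toNat < (pvRowAt m i).length),
          if_pos ⟨⟨by omega, by omega⟩, h4⟩]
      · rw [if_pos h3, if_neg (by omega : ¬ c.toNat < (pvRowAt m i).length),
          if_neg (by rintro ⟨_, h⟩; omega), List.getElem?_eq_none (by omega)]
    · rw [if_neg h3, if_neg (by rintro ⟨⟨_, hcj⟩, _⟩; omega)]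
  · rw [if_neg h1]
    rw [if_neg ?hcond]
    case hcond =>
      rintro ⟨⟨hri, _⟩, hj⟩
      have hii : r.toNat = i := by omega
      have hlen : m.length ≤ i := by
        by_contra hcon
        exact h1 ⟨hii, by omega⟩
      rw [pvRowAt_eq_nil m i hlen] at hj
      simp at hj

theorem pvWrites_length (m : List (List Int)) (ps : List (Int × Int)) :
    (pvWrites m ps).length = m.length := by
  induction ps generalizing m with
  | nil => rfl
  | cons p ps ih => rw [pvWrites, List.foldl_cons, ← pvWrites, ih, pvSet_length]

theorem pvWrites_elem (ps : List (Int × Int)) (m : List (List Int))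
    (hps : ∀ p ∈ ps, 0 ≤ p.1 ∧ 0 ≤ p.2) (i j : Nat) :
    (pvRowAt (pvWrites m ps) i)[j]? =
      if (∃ p ∈ ps, p.1 = (i : Int) ∧ p.2 = (j : Int)) ∧ j < (pvRowAt m i).length then some 255
      else (pvRowAt m i)[j]? := by
  induction ps generalizing m with
  | nil =>
    rw [pvWrites, List.foldl_nil]
    simp
  | cons p ps ih =>
    have h0 := hps p (by simp)
    rw [pvWrites, List.foldl_cons, ← pvWrites,
      ih _ (fun q hq => hps q (by simp [hq])),
      pvRowAt_pvSet_length _ _ _ h0.1 h0.2, pvSet_elem _ _ _ h0.1 h0.2]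
    by_cases hlen : j < (pvRowAt m i).length
    · by_cases hp : p.1 = (i : Int) ∧ p.2 = (j : Int)
      · by_cases hq : ∃ q ∈ ps, q.1 = (i : Int) ∧ q.2 = (j : Int)
        · rw [if_pos ⟨hq, hlen⟩, if_pos ⟨⟨p, by simp, hp⟩, hlen⟩]
        · rw [if_neg (fun h => hq h.1), if_pos ⟨hp, hlen⟩,
            if_pos ⟨⟨p, by simp, hp⟩, hlen⟩]
      · by_cases hq : ∃ q ∈ ps, q.1 = (i : Int) ∧ q.2 = (j : Int)
        · obtain ⟨q, hq1, hq2⟩ := hq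
          rw [if_pos ⟨⟨q, hq1, hq2⟩, hlen⟩, if_pos ⟨⟨q, by simp [hq1], hq2⟩, hlen⟩]
        · rw [if_neg (fun h => hq h.1), if_neg (fun h => hp h.1)]
          rw [if_neg ?hcond]
          case hcond =>
            rintro ⟨⟨q, hq1, hq2⟩, _⟩
            rcases List.mem_cons.mp hq1 with h | h
            · exact hp (h ▸ hq2)
            · exact hq ⟨q, h, hq2⟩
    · rw [if_neg (fun h => hlen h.2), if_neg (fun h => hlen h.2), if_neg (fun h => hlen h.2)]

theorem pvWrites_eq_of_iff (ps qs : List (Int × Int)) (m : List (List Int))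
    (hps : ∀ p ∈ ps, 0 ≤ p.1 ∧ 0 ≤ p.2) (hqs : ∀ p ∈ qs, 0 ≤ p.1 ∧ 0 ≤ p.2)
    (h : ∀ (i j : Nat), (∃ p ∈ ps, p.1 = (i : Int) ∧ p.2 = (j : Int)) ↔
        (∃ p ∈ qs, p.1 = (i : Int) ∧ p.2 = (j : Int))) :
    pvWrites m ps = pvWrites m qs := by
  apply List.ext_getElem?
  intro i
  by_cases hi : i < m.length
  · have hp1 : i < (pvWrites m ps).length := by rw [pvWrites_length]; exact hi
    have hp2 : i < (pvWrites m qs).length := by rw [pvWrites_length]; exact hi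
    rw [List.getElem?_eq_getElem hp1, List.getElem?_eq_getElem hp2]
    have e1 : ∀ (rs : List (Int × Int)) (hr : i < (pvWrites m rs).length),
        (pvWrites m rs)[i] = pvRowAt (pvWrites m rs) i := by
      intro rs hr
      simp [pvRowAt, List.getElem?_eq_getElem hr]
    rw [e1 ps hp1, e1 qs hp2]
    congr 1
    apply List.ext_getElem?
    intro j
    rw [pvWrites_elem _ _ hps, pvWrites_elem _ _ hqs]
    by_cases hcond : (∃ p ∈ ps, p.1 = (i : Int) ∧ p.2 = (j : Int)) ∧ j < (pvRowAt m i).length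
    · rw [if_pos hcond, if_pos ⟨(h i j).mp hcond.1, hcond.2⟩]
    · rw [if_neg hcond, if_neg (fun hx => hcond ⟨(h i j).mpr hx.1, hx.2⟩)]
  · rw [List.getElem?_eq_none (by rw [pvWrites_length]; omega),
      List.getElem?_eq_none (by rw [pvWrites_length]; omega)]

theorem pvContains_pair (x y z : Int) :
    ((PySem.Set.ofList [x, y]).contains z = true) ↔ (z = x ∨ z = y) := by
  simp [PySem.Set.contains]

theorem grids_eq (m : List (List Int)) (M N mrs mre mcs mce : Int)
    (h1 : 1 ≤ M) (h2 : 1 ≤ N)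
    (hmrs : mrs = (M - 1) / 2) (hmre : mre = M / 2)
    (hmcs : mcs = (N - 1) / 2) (hmce : mce = N / 2) :
    pvWrites m
      ((PySem.List.pyRange mrs (mre + 1) 1).flatMap
          (fun r => (PySem.List.pyRange 0 N 1).map (fun c => (r, c))) ++
        (PySem.List.pyRange mcs (mce + 1) 1).flatMap
          (fun c => (PySem.List.pyRange 0 M 1).map (fun r => (r, c)))) =
    pvWrites m
      ((PySem.List.pyRange 0 M 1).flatMap
        (fun r => ((PySem.List.pyRange 0 N 1).filter
            (fun c => (PySem.Set.ofList [mrs, mre]).contains r ||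
              (PySem.Set.ofList [mcs, mce]).contains c)).map (fun c => (r, c)))) := by
  have memA : ∀ a b : Int,
      ((a, b) ∈ (PySem.List.pyRange mrs (mre + 1) 1).flatMap
          (fun r => (PySem.List.pyRange 0 N 1).map (fun c => (r, c))) ++
        (PySem.List.pyRange mcs (mce + 1) 1).flatMap
          (fun c => (PySem.List.pyRange 0 M 1).map (fun r => (r, c)))) ↔
      (((mrs ≤ a ∧ a < mre + 1) ∧ (0 ≤ b ∧ b < N)) ∨
        ((mcs ≤ b ∧ b < mce + 1) ∧ (0 ≤ a ∧ a < M))) := by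
    intro a b
    simp only [List.mem_append, List.mem_flatMap, List.mem_map,
      PySem.List.mem_pyRange_one, Prod.mk.injEq]
    constructor
    · rintro (⟨r, hr, c, hc, rfl, rfl⟩ | ⟨c, hc, r, hr, rfl, rfl⟩)
      · exact Or.inl ⟨hr, hc⟩
      · exact Or.inr ⟨hc, hr⟩
    · rintro (⟨ha, hb⟩ | ⟨hb, ha⟩)
      · exact Or.inl ⟨a, ha, b, hb, rfl, rfl⟩
      · exact Or.inr ⟨b, hb, a, ha, rfl, rfl⟩
  have memB : ∀ a b : Int,
      ((a, b) ∈ (PySem.List.pyRange 0 M 1).flatMap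
        (fun r => ((PySem.List.pyRange 0 N 1).filter
            (fun c => (PySem.Set.ofList [mrs, mre]).contains r ||
              (PySem.Set.ofList [mcs, mce]).contains c)).map (fun c => (r, c)))) ↔
      ((0 ≤ a ∧ a < M) ∧ (0 ≤ b ∧ b < N) ∧
        (a = mrs ∨ a = mre ∨ b = mcs ∨ b = mce)) := by
    intro a b
    simp only [List.mem_flatMap, List.mem_map, List.mem_filter,
      PySem.List.mem_pyRange_one, Prod.mk.injEq, Bool.or_eq_true, pvContains_pair]
    constructor
    · rintro ⟨r, hr, c, ⟨hc, hmid⟩, rfl, rfl⟩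
      exact ⟨hr, hc, by tauto⟩
    · rintro ⟨ha, hb, hmid⟩
      exact ⟨a, ha, b, ⟨hb, by tauto⟩, rfl, rfl⟩
  apply pvWrites_eq_of_iff
  · rintro ⟨a, b⟩ hp
    rcases (memA a b).mp hp with ⟨hr, hc⟩ | ⟨hc, hr⟩ <;>
      exact ⟨by omega, by omega⟩
  · rintro ⟨a, b⟩ hp
    obtain ⟨ha, hb, _⟩ := (memB a b).mp hp
    exact ⟨by omega, by omega⟩
  · intro i j
    constructor
    · rintro ⟨⟨a, b⟩, hp, h1e, h2e⟩
      have ha' : a = (i : Int) := h1e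
      have hb' : b = (j : Int) := h2e
      subst ha'; subst hb'
      refine ⟨((i : Int), (j : Int)), (memB _ _).mpr ?_, rfl, rfl⟩
      rcases (memA _ _).mp hp with ⟨hr, hc⟩ | ⟨hc, hr⟩
      · exact ⟨⟨by omega, by omega⟩, ⟨by omega, by omega⟩, by omega⟩
      · exact ⟨⟨by omega, by omega⟩, ⟨by omega, by omega⟩, by omega⟩
    · rintro ⟨⟨a, b⟩, hp, h1e, h2e⟩
      have ha' : a = (i : Int) := h1e
      have hb' : b = (j : Int) := h2e
      subst ha'; subst hb'
      obtain ⟨ha, hb, hmid⟩ := (memB _ _).mp hp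
      refine ⟨((i : Int), (j : Int)), (memA _ _).mpr ?_, rfl, rfl⟩
      rcases hmid with h | h | h | h
      · exact Or.inl ⟨⟨by omega, by omega⟩, by omega, by omega⟩
      · exact Or.inl ⟨⟨by omega, by omega⟩, by omega, by omega⟩
      · exact Or.inr ⟨⟨by omega, by omega⟩, by omega, by omega⟩
      · exact Or.inr ⟨⟨by omega, by omega⟩, by omega, by omega⟩

theorem ports_eq (m : List (List Int)) (hm : m ≠ []) (hn : 1 ≤ (m.headD []).length) :
    fill_middle m = fill_middle_alt m := by
  have hM1 : 1 ≤ (m.length : Int) := by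
    have := List.length_pos_of_ne_nil hm
    omega
  have hN1 : 1 ≤ ((m.headD []).length : Int) := by omega
  have e2 : (0 : Int) < 2 := by norm_num
  have hA : fill_middle m = pvWrites m
      ((PySem.List.pyRange (PySem.Int.floordiv ((m.length : Int) - 1) 2)
          (PySem.Int.floordiv (m.length : Int) 2 + 1) 1).flatMap
        (fun r => (PySem.List.pyRange 0 ((m.headD []).length : Int) 1).map (fun c => (r, c))) ++
       (PySem.List.pyRange (PySem.Int.floordiv (((m.headD []).length : Int) - 1) 2)
          (PySem.Int.floordiv ((m.headD []).length : Int) 2 + 1) 1).flatMap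
        (fun c => (PySem.List.pyRange 0 (m.length : Int) 1).map (fun r => (r, c)))) := by
    simp only [fill_middle, pvWrites, List.foldl_append, List.foldl_flatMap, List.foldl_map]
  have hB : fill_middle_alt m = pvWrites m
      ((PySem.List.pyRange 0 (m.length : Int) 1).flatMap
        (fun r => ((PySem.List.pyRange 0 ((m.headD []).length : Int) 1).filter
            (fun c => (PySem.Set.ofList [PySem.Int.floordiv ((m.length : Int) - 1) 2,
                PySem.Int.floordiv (m.length : Int) 2]).contains r ||
              (PySem.Set.ofList [PySem.Int.floordiv (((m.headD []).length : Int) - 1) 2,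
                PySem.Int.floordiv ((m.headD []).length : Int) 2]).contains c)).map
          (fun c => (r, c)))) := by
    simp only [fill_middle_alt, pvWrites, List.foldl_flatMap, List.foldl_map, List.foldl_filter]
  rw [hA, hB]
  exact grids_eq m _ _ _ _ _ _ hM1 hN1
    (PySem.Int.floordiv_eq_ediv_of_pos e2) (PySem.Int.floordiv_eq_ediv_of_pos e2)
    (PySem.Int.floordiv_eq_ediv_of_pos e2) (PySem.Int.floordiv_eq_ediv_of_pos e2)

-- ===== VERDICT (by name: the statement is the Claim_ definition above) =====
theorem fill_middle_spec : Claim_equal_fill_middle := by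
  intro matrix _ hpre
  unfold Spec_fill_middle
  exact ports_eq matrix hpre.1 hpre.2.1
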